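-- pv_equiv track=rewrite | github.com/pfptcommunity/senderstats | src/senderstats/common/address_parser.py | _fallback_parse_last_at_token
-- ===== SOURCE A (Python) =====
-- from typing import Dict, Tuple, Iterable, List
--
-- def _fallback_parse_last_at_token(s: str) -> Tuple[str, str]:
--     at = s.rfind("@")
--     if at == -1:
--         return s, ""
--     j = at - 1
--     while j >= 0 and not s[j].isspace():
--         j -= 1
--     if j >= 0:
--         return s[:j].strip(), s[j + 1:].strip()
--     return "", s
-- ===== SOURCE B (Python) =====
-- from typing import Tuple
--
-- def _fallback_parse_last_at_token(s: str) -> Tuple[str, str]: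
--     # One forward pass: track the last whitespace seen, and on each '@'
--     # snapshot its index and the whitespace boundary before it.
--     last_space = -1
--     at = -1
--     boundary = -1
--     for i, c in enumerate(s):
--         if c.isspace():
--             last_space = i
--         elif c == "@":
--             at = i
--             boundary = last_space
--     if at == -1:
--         return s, ""
--     if boundary >= 0:
--         return s[:boundary].strip(), s[boundary + 1:].strip()
--     return "", s
-- ===== Notes on version B (the rewrite author's own statement) =====
-- stated objective: alternative
-- what changed: Replaced rfind of the at-sign plus a backward while-scan for whitespace by a single forward pass with enumerate that maintains the last whitespace index and snapshots (at, boundary) on each at-sign.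
import Mathlib
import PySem

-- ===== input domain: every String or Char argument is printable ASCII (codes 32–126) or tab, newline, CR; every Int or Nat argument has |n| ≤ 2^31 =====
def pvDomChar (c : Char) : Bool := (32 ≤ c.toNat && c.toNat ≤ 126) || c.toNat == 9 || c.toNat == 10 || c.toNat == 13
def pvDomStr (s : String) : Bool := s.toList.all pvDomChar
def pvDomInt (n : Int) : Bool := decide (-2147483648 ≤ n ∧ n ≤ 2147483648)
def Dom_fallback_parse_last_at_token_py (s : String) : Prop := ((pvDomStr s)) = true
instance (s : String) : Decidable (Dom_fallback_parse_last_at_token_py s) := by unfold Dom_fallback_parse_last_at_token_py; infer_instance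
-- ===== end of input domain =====

-- B replaces A's rfind-plus-backward-while-scan by one forward pass
-- that maintains (last_space, at, boundary); an alternative decomposition, same values.

-- ===== PORT A =====
-- the backward scan 'while j >= 0 and not s[j].isspace(): j -= 1';
-- s[j] is always in range when read (0 <= j < len s), so pyGetD's default is never used
def pvWhileA (cs : List Char) (j : Int) : Int :=
  if h : 0 ≤ j then
    if ¬ PySem.Chars.isspace (PySem.List.pyGetD cs j ' ') then pvWhileA cs (j - 1) else j
  else j
termination_by (j + 1).toNat
decreasing_by omega


def fallback_parse_last_at_token_py (s : String) : String × String :=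
  let a := PySem.Str.rfind s "@"
  if a = -1 then (s, "")
  else
    let j := pvWhileA s.toList (a - 1)
    if 0 ≤ j then
      (PySem.Str.strip (PySem.Str.slice s none (some j)),
       PySem.Str.strip (PySem.Str.slice s (some (j + 1)) none))
    else ("", s)

-- ===== PORT B =====
-- loop body: state = (last_space, at, boundary)
def pvAltStep (acc : Int × Int × Int) (p : Int × Char) : Int × Int × Int :=
  if PySem.Chars.isspace p.2 then (p.1, acc.2.1, acc.2.2)
  else if p.2 == '@' then (acc.1, p.1, acc.1)
  else acc


def fallback_parse_last_at_token_py_alt (s : String) : String × String :=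
  let st := (PySem.List.enumerate s.toList).foldl pvAltStep (-1, -1, -1)
  if st.2.1 = -1 then (s, "")
  else if 0 ≤ st.2.2 then
    (PySem.Str.strip (PySem.Str.slice s none (some st.2.2)),
     PySem.Str.strip (PySem.Str.slice s (some (st.2.2 + 1)) none))
  else ("", s)

-- ===== PRECONDITION & SPEC =====
def Spec_fallback_parse_last_at_token_py (s : String) (out : String × String) : Prop := out = fallback_parse_last_at_token_py_alt s
instance (s : String) (out : String × String) : Decidable (Spec_fallback_parse_last_at_token_py s out) := by unfold Spec_fallback_parse_last_at_token_py; infer_instance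

-- ===== CLAIM (what is proved, stated in full; the proofs are below) =====
def Claim_equal_fallback_parse_last_at_token_py : Prop := ∀ (s : String), Dom_fallback_parse_last_at_token_py s → Spec_fallback_parse_last_at_token_py s (fallback_parse_last_at_token_py s)

-- ===== LEMMAS AND PROOFS =====

-- last index (as Int, -1 if none) of a char satisfying p
def pvLastP (p : Char → Bool) : List Char → Int
  | [] => -1
  | c :: t => if pvLastP p t = -1 then (if p c then 0 else -1) else pvLastP p t + 1

theorem pvLastP_bounds (p : Char → Bool) (cs : List Char) :
    -1 ≤ pvLastP p cs ∧ pvLastP p cs < cs.length := by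
  induction cs with
  | nil => simp [pvLastP]
  | cons c t ih =>
    simp only [pvLastP, List.length_cons]
    push_cast
    split_ifs <;> omega

theorem pvLastP_append (p : Char → Bool) (cs : List Char) (c : Char) :
    pvLastP p (cs ++ [c]) = if p c then (cs.length : Int) else pvLastP p cs := by
  induction cs with
  | nil => simp [pvLastP]
  | cons d t ih =>
    have hb := pvLastP_bounds p t
    have hb2 := pvLastP_bounds p (t ++ [c])
    simp only [List.length_append, List.length_singleton] at hb2
    simp only [List.cons_append, pvLastP, ih, List.length_cons, List.length_append,
      List.length_singleton]
    push_cast at *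
    split_ifs <;> first | omega | exact absurd ‹False› not_false

theorem pvLastP_take_of_le (p : Char → Bool) (cs : List Char) (m : Nat) (h : cs.length ≤ m) :
    pvLastP p (cs.take m) = pvLastP p cs := by
  rw [List.take_of_length_le h]


-- the boundary component in terms of the last '@'
def pvBdy (cs : List Char) : Int :=
  if pvLastP (· == '@') cs = -1 then -1
  else pvLastP PySem.Chars.isspace (cs.take (pvLastP (· == '@') cs).toNat)

theorem pvFold_eq (cs : List Char) :
    (PySem.List.enumerate cs).foldl pvAltStep (-1, -1, -1)
      = (pvLastP PySem.Chars.isspace cs, pvLastP (· == '@') cs, pvBdy cs) := by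
  induction cs using List.reverseRecOn with
  | nil => simp [PySem.List.enumerate, pvLastP, pvBdy]
  | append_singleton cs c ih =>
    have hat := pvLastP_bounds (· == '@') cs
    rw [PySem.List.enumerate_append, List.foldl_append, ih]
    simp only [PySem.List.enumerate, List.foldl, zero_add]
    by_cases hsp : PySem.Chars.isspace c
    · have hc : (c == '@') = false := by
        cases hcc : c == '@'
        · rfl
        · exfalso
          have : c = '@' := beq_iff_eq.mp hcc
          subst this
          exact absurd hsp (by decide)
      have h1 : pvLastP PySem.Chars.isspace (cs ++ [c]) = (cs.length : Int) := by
        rw [pvLastP_append, if_pos hsp]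
      have h2 : pvLastP (· == '@') (cs ++ [c]) = pvLastP (· == '@') cs := by
        rw [pvLastP_append]
        simp [hc]
      have h3 : pvBdy (cs ++ [c]) = pvBdy cs := by
        unfold pvBdy
        rw [h2]
        split_ifs with h
        · rfl
        · rw [List.take_append_of_le_length (by omega)]
      simp [pvAltStep, hsp, h1, h2, h3]
    · by_cases hc : (c == '@') = true
      · have h1 : pvLastP PySem.Chars.isspace (cs ++ [c]) = pvLastP PySem.Chars.isspace cs := by
          rw [pvLastP_append, if_neg hsp]
        have h2 : pvLastP (· == '@') (cs ++ [c]) = (cs.length : Int) := by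
          rw [pvLastP_append]
          simp [hc]
        have h3 : pvBdy (cs ++ [c]) = pvLastP PySem.Chars.isspace cs := by
          unfold pvBdy
          rw [h2, if_neg (by omega), Int.toNat_natCast, List.take_left]
        simp [pvAltStep, hsp, hc, h1, h2, h3]
      · have h1 : pvLastP PySem.Chars.isspace (cs ++ [c]) = pvLastP PySem.Chars.isspace cs := by
          rw [pvLastP_append, if_neg hsp]
        have h2 : pvLastP (· == '@') (cs ++ [c]) = pvLastP (· == '@') cs := by
          rw [pvLastP_append]
          simp [hc]
        have h3 : pvBdy (cs ++ [c]) = pvBdy cs := by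
          unfold pvBdy
          rw [h2]
          split_ifs with h
          · rfl
          · rw [List.take_append_of_le_length (by omega)]
        simp [pvAltStep, hsp, hc, h1, h2, h3]

theorem pvPrefixAt (cs : List Char) :
    (['@'].isPrefixOf cs) = (cs.head? == some '@') := by
  cases cs with
  | nil => rfl
  | cons c t =>
    simp [List.isPrefixOf, BEq.comm]

theorem pvRfindGo_eq (cs : List Char) (k : Nat) :
    PySem.Chars.rfind.go cs ['@'] k = pvLastP (· == '@') (cs.take (k + 1)) := by
  induction k with
  | zero =>
    rw [PySem.Chars.rfind.go]
    cases cs with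
    | nil => simp [pvLastP]
    | cons c t =>
      rw [pvPrefixAt]
      simp only [List.head?, List.take_succ_cons, List.take_zero, pvLastP]
      cases hc : c == '@'
      · simp [hc]
      · simp [hc]
  | succ k ih =>
    rw [PySem.Chars.rfind.go, ih]
    by_cases hk : k + 1 < cs.length
    · have hdrop : cs.drop (k + 1) = cs[k+1] :: cs.drop (k + 2) :=
        List.drop_eq_getElem_cons hk
      have htake : cs.take (k + 1 + 1) = cs.take (k + 1) ++ [cs[k+1]] := by
        rw [List.take_succ, List.getElem?_eq_getElem hk]
        rfl
      have hlen : (cs.take (k + 1)).length = k + 1 := by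
        simp
        omega
      rw [htake, pvLastP_append, hdrop, pvPrefixAt]
      simp only [List.head?_cons]
      cases hc : cs[k+1] == '@'
      · simp [hc]
      · simp [hc, hlen]
    · rw [List.drop_eq_nil_of_le (by omega)]
      rw [pvLastP_take_of_le _ _ _ (by omega), pvLastP_take_of_le _ _ _ (by omega)]
      simp

theorem pvRfind_eq (cs : List Char) :
    PySem.Chars.rfind cs ['@'] = pvLastP (· == '@') cs := by
  cases cs with
  | nil => rfl
  | cons c t =>
    show PySem.Chars.rfind.go (c :: t) ['@'] (c :: t).length = _
    simp only [List.length_cons]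
    rw [pvRfindGo_eq]
    exact pvLastP_take_of_le _ _ _ (by simp)

theorem pvWhileA_eq (cs : List Char) (j : Int) (hlo : -1 ≤ j) (hhi : j < cs.length) :
    pvWhileA cs j = pvLastP PySem.Chars.isspace (cs.take (j + 1).toNat) := by
  by_cases h0 : 0 ≤ j
  · obtain ⟨n, hn⟩ : ∃ n : Nat, j = (n : Int) := ⟨j.toNat, by omega⟩
    subst hn
    clear hlo h0
    induction n with
    | zero =>
      rw [pvWhileA]
      have hl : 0 < cs.length := by exact_mod_cast hhi
      have hget : PySem.List.pyGetD cs ((0 : Nat) : Int) ' ' = cs[0] :=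
        PySem.List.pyGetD_ofNat cs 0 ' ' hl
      have htake : cs.take ((((0 : Nat) : Int)) + 1).toNat = [cs[0]] := by
        have h2 : ((((0 : Nat) : Int)) + 1).toNat = 1 := by omega
        rw [h2, List.take_one, List.head?_eq_getElem?, List.getElem?_eq_getElem hl]
        rfl
      rw [dif_pos (by omega), hget, htake]
      by_cases hsp : PySem.Chars.isspace cs[0]
      · rw [if_neg (by simp [hsp])]
        simp [pvLastP, hsp]
      · rw [if_pos (by simp [hsp])]
        have h3 : (((0 : Nat) : Int)) - 1 = -1 := by omega
        rw [h3, pvWhileA, dif_neg (by norm_num)]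
        simp [pvLastP, hsp]
    | succ n ihn =>
      rw [pvWhileA]
      have hl : n + 1 < cs.length := by exact_mod_cast hhi
      have hget : PySem.List.pyGetD cs (((n + 1 : Nat)) : Int) ' ' = cs[n+1] :=
        PySem.List.pyGetD_ofNat cs (n+1) ' ' hl
      have htake : cs.take ((((n + 1 : Nat) : Int)) + 1).toNat
          = cs.take (n + 1) ++ [cs[n+1]] := by
        have h2 : ((((n + 1 : Nat) : Int)) + 1).toNat = n + 2 := by omega
        rw [h2, List.take_add_one, List.getElem?_eq_getElem hl]
        rfl
      rw [dif_pos (by omega), hget, htake, pvLastP_append]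
      by_cases hsp : PySem.Chars.isspace cs[n+1]
      · rw [if_neg (by simp [hsp]), if_pos hsp]
        simp [List.length_take]
        omega
      · rw [if_pos (by simp [hsp]), if_neg hsp]
        have h3 : (((n + 1 : Nat) : Int)) - 1 = ((n : Nat) : Int) := by omega
        rw [h3, ihn (by omega)]
        congr 2
  · have hj : j = -1 := by omega
    subst hj
    rw [pvWhileA, dif_neg (by omega)]
    simp [pvLastP]

theorem pvMain (s : String) :
    fallback_parse_last_at_token_py s = fallback_parse_last_at_token_py_alt s := by
  unfold fallback_parse_last_at_token_py fallback_parse_last_at_token_py_alt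
  rw [pvFold_eq]
  have hr : PySem.Str.rfind s "@" = pvLastP (· == '@') s.toList := by
    rw [PySem.Str.rfind_eq]
    have h : "@".toList = ['@'] := by decide
    rw [h]
    exact pvRfind_eq s.toList
  have hb := pvLastP_bounds (· == '@') s.toList
  simp only [hr]
  by_cases ha : pvLastP (· == '@') s.toList = -1
  · simp [ha]
  · rw [if_neg ha]
    have hw : pvWhileA s.toList (pvLastP (· == '@') s.toList - 1)
        = pvBdy s.toList := by
      rw [pvWhileA_eq _ _ (by omega) (by omega)]
      unfold pvBdy
      rw [if_neg ha]
      congr 2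
      omega
    simp only [hw, if_neg ha]

-- ===== VERDICT (by name: the statement is the Claim_ definition above) =====
theorem fallback_parse_last_at_token_py_spec : Claim_equal_fallback_parse_last_at_token_py := by
  intro s _
  unfold Spec_fallback_parse_last_at_token_py
  exact pvMain s
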